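-- pv_equiv track=rewrite | github.com/mijiaco/moneyball-analyst-bot | src/trade_notify.py | _build_player_name_index
-- ===== SOURCE A (Python) =====
-- def _build_player_name_index(players: dict[str, str]) -> dict[str, str]:
--     """
--     Build a normalized player label -> player id index.
--     Keep only unique labels to avoid ambiguous salary lookups.
--     """
--     by_name: dict[str, str] = {}
--     duplicates: set[str] = set()
--     for pid, label in players.items():
--         key = " ".join(str(label).strip().split()).casefold()
--         if not key:
--             continue
--         existing_pid = by_name.get(key)
--         if existing_pid is None:
--             by_name[key] = pid
--             continue
--         if existing_pid != pid:
--             duplicates.add(key)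
--     for dup in duplicates:
--         by_name.pop(dup, None)
--     return by_name
-- ===== SOURCE B (Python) =====
-- def _build_player_name_index(players: dict[str, str]) -> dict[str, str]:
--     """
--     Build a normalized player label -> player id index.
--     Keep only unique labels to avoid ambiguous salary lookups.
--     """
--     pairs = [(pid, " ".join(str(label).strip().split()).casefold())
--              for pid, label in players.items()]
--     out: dict[str, str] = {}
--     while pairs:
--         (pid, key), rest = pairs[0], pairs[1:]
--         if key and all(p[0] == pid for p in rest if p[1] == key):
--             out[key] = pid
--         pairs = [p for p in rest if p[1] != key]
--     return out
-- ===== Notes on version B (the rewrite author's own statement) =====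
-- stated objective: alternative
-- what changed: A's stateful single pass (first-seen dict plus a duplicates set popped afterwards) is replaced by a worklist partition loop: repeatedly take the first pending entry's normalized key, keep key->pid only if every pending entry with that key carries the same pid, and discard the whole key group from the worklist.
import Mathlib
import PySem

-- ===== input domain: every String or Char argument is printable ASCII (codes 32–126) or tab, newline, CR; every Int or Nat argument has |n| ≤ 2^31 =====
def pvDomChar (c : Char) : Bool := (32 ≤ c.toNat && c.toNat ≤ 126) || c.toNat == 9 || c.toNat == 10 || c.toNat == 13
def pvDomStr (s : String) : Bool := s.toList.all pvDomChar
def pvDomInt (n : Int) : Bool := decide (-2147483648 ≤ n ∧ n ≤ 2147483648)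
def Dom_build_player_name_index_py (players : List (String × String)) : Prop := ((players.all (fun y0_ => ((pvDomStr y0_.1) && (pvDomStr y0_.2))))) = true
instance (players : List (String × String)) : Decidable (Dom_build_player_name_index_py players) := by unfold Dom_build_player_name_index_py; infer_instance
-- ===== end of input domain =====

-- B replaces A's stateful pass (first-seen dict + duplicates set popped afterwards) by a worklist
-- partition loop: take the first pending key group, keep it iff all its pids agree, drop the group
-- (objective: alternative decomposition, same results).

-- ===== PORT A =====
-- key = " ".join(str(label).strip().split()).casefold(); .casefold() is .lower() on the ASCII domain (exact there)
def pvNormKey (label : String) : String :=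
  PySem.Str.lower (PySem.Str.join " " (PySem.Str.split₀ (PySem.Str.strip label)))

-- one iteration of A's first loop over (pid, label), state = (by_name, duplicates)
def pvStepA (st : PySem.Dict String String × PySem.Set String) (pl : String × String) :
    PySem.Dict String String × PySem.Set String :=
  let key := pvNormKey pl.2
  if key = "" then st
  else
    match st.1.get? key with
    | none => (st.1.insert key pl.1, st.2)
    | some existing_pid => if existing_pid ≠ pl.1 then (st.1, PySem.Set.add st.2 key) else st

def build_player_name_index_py (players : List (String × String)) : List (String × String) :=
  let st := players.foldl pvStepA (PySem.Dict.empty, PySem.Set.empty)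
  -- second loop: for dup in duplicates: by_name.pop(dup, None)  (popping commutes, so list order is irrelevant)
  (st.2.foldl (fun d dup => d.erase dup) st.1).items

-- ===== PORT B =====
-- B's while-loop: state = (pending pairs, out); each pass consumes the whole head-key group,
-- ported as the obvious structural recursion on the shrinking worklist
def pvGo (pairs : List (String × String)) (out : PySem.Dict String String) :
    PySem.Dict String String :=
  match pairs with
  | [] => out
  | (pid, key) :: rest =>
      let out' := if key ≠ "" ∧ ∀ p ∈ rest, p.2 = key → p.1 = pid then out.insert key pid else out
      pvGo (rest.filter (fun p => p.2 ≠ key)) out'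
  termination_by pairs.length
  decreasing_by simpa using le_trans (List.length_filter_le _ _) (le_of_eq (List.length_attach))

def build_player_name_index_py_alt (players : List (String × String)) : List (String × String) :=
  (pvGo (players.map (fun pl => (pl.1, pvNormKey pl.2))) PySem.Dict.empty).items

-- ===== PRECONDITION & SPEC =====
def Spec_build_player_name_index_py (players : List (String × String)) (out : List (String × String)) : Prop := out = build_player_name_index_py_alt players
instance (players : List (String × String)) (out : List (String × String)) : Decidable (Spec_build_player_name_index_py players out) := by unfold Spec_build_player_name_index_py; infer_instance

-- ===== CLAIM (what is proved, stated in full; the proofs are below) =====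
def Claim_equal_build_player_name_index_py : Prop := ∀ (players : List (String × String)), Dom_build_player_name_index_py players → Spec_build_player_name_index_py players (build_player_name_index_py players)

-- ===== LEMMAS AND PROOFS =====

-- the by_name component of A's fold, as a recursion (it never reads the duplicates set)
def pvBNF (bn : PySem.Dict String String) (ps : List (String × String)) : PySem.Dict String String :=
  match ps with
  | [] => bn
  | pl :: rest =>
      let k := pvNormKey pl.2
      if k = "" then pvBNF bn rest
      else match bn.get? k with
        | none => pvBNF (bn.insert k pl.1) rest
        | some _ => pvBNF bn rest

-- does A's fold, run from by_name = bn, flag x as a duplicate key?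
def pvConf (bn : PySem.Dict String String) (ps : List (String × String)) (x : String) : Bool :=
  match ps with
  | [] => false
  | pl :: rest =>
      let k := pvNormKey pl.2
      if k = "" then pvConf bn rest x
      else match bn.get? k with
        | none => pvConf (bn.insert k pl.1) rest x
        | some e => ((e != pl.1) && (x == k)) || pvConf bn rest x

lemma pvL1 (ps : List (String × String)) : ∀ (bn : PySem.Dict String String)
    (d : PySem.Set String), (ps.foldl pvStepA (bn, d)).1 = pvBNF bn ps := by
  induction ps with
  | nil => intro bn d; rfl
  | cons pl rest ih =>
      intro bn d
      simp only [List.foldl_cons, pvBNF]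
      by_cases hk : pvNormKey pl.2 = ""
      · simp [pvStepA, hk, ih]
      · cases hg : bn.get? (pvNormKey pl.2) with
        | none => simp [pvStepA, hk, hg, ih]
        | some e => by_cases he : e = pl.1 <;> simp [pvStepA, hk, hg, he, ih]

lemma pvL2 (ps : List (String × String)) : ∀ (bn : PySem.Dict String String)
    (d : PySem.Set String) (x : String),
    x ∈ (ps.foldl pvStepA (bn, d)).2 ↔ x ∈ d ∨ pvConf bn ps x = true := by
  induction ps with
  | nil => intro bn d x; simp [pvConf]
  | cons pl rest ih =>
      intro bn d x
      simp only [List.foldl_cons, pvConf]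
      by_cases hk : pvNormKey pl.2 = ""
      · simp [pvStepA, hk, ih]
      · cases hg : bn.get? (pvNormKey pl.2) with
        | none => simp [pvStepA, hk, hg, ih]
        | some e =>
            by_cases he : e = pl.1
            · simp [pvStepA, hk, hg, he, ih]
            · rw [show pvStepA (bn, d) pl = (bn, PySem.Set.add d (pvNormKey pl.2)) by
                simp [pvStepA, hk, hg, he]]
              rw [ih, PySem.Set.mem_add, if_neg hk]
              simp only [Bool.or_eq_true, Bool.and_eq_true, bne_iff_ne, beq_iff_eq, ne_eq, he,
                not_false_iff, true_and]
              exact or_assoc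

lemma pvEraseFold (S : List String) (d : PySem.Dict String String) :
    (S.foldl (fun d dup => d.erase dup) d).items = d.items.filter (fun kv => decide (kv.1 ∉ S)) := by
  induction S generalizing d with
  | nil => simp
  | cons a S ih =>
      simp only [List.foldl_cons]
      rw [ih]
      show ((d.erase a).items).filter _ = _
      simp only [PySem.Dict.erase, List.filter_filter]
      apply List.filter_congr
      intro kv _
      by_cases h1 : kv.1 = a <;> by_cases h2 : kv.1 ∈ S <;> simp [h1, h2]

-- a conflict is always on the normalized key of some processed entry
lemma pvConfKeys (ps : List (String × String)) : ∀ (bn : PySem.Dict String String) (x : String),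
    pvConf bn ps x = true → ∃ q ∈ ps, pvNormKey q.2 = x := by
  induction ps with
  | nil => intro bn x h; simp [pvConf] at h
  | cons pl rest ih =>
      intro bn x h
      simp only [pvConf] at h
      by_cases hk : pvNormKey pl.2 = ""
      · rw [if_pos hk] at h
        obtain ⟨q, hq, hqx⟩ := ih bn x h
        exact ⟨q, List.mem_cons_of_mem _ hq, hqx⟩
      · rw [if_neg hk] at h
        cases hg : bn.get? (pvNormKey pl.2) with
        | none =>
            rw [hg] at h
            obtain ⟨q, hq, hqx⟩ := ih _ x h
            exact ⟨q, List.mem_cons_of_mem _ hq, hqx⟩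
        | some e =>
            rw [hg] at h
            simp only [Bool.or_eq_true, Bool.and_eq_true, beq_iff_eq, bne_iff_ne] at h
            rcases h with ⟨_, hx⟩ | h
            · exact ⟨pl, List.mem_cons_self, hx.symm⟩
            · obtain ⟨q, hq, hqx⟩ := ih bn x h
              exact ⟨q, List.mem_cons_of_mem _ hq, hqx⟩

-- every entry of pvBNF comes from bn or from a processed entry's key
lemma pvBNFKeys (ps : List (String × String)) : ∀ (bn : PySem.Dict String String)
    (kv : String × String), kv ∈ (pvBNF bn ps).items →
    kv ∈ bn.items ∨ ∃ q ∈ ps, pvNormKey q.2 = kv.1 := by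
  induction ps with
  | nil => intro bn kv h; exact Or.inl h
  | cons pl rest ih =>
      intro bn kv h
      simp only [pvBNF] at h
      by_cases hk : pvNormKey pl.2 = ""
      · rw [if_pos hk] at h
        rcases ih bn kv h with h1 | ⟨q, hq, hqx⟩
        · exact Or.inl h1
        · exact Or.inr ⟨q, List.mem_cons_of_mem _ hq, hqx⟩
      · rw [if_neg hk] at h
        cases hg : bn.get? (pvNormKey pl.2) with
        | none =>
            rw [hg] at h
            rcases ih _ kv h with h1 | ⟨q, hq, hqx⟩
            · rcases (PySem.Dict.mem_items_insert _ _ _ _).mp h1 with h2 | ⟨h2, _⟩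
              · exact Or.inr ⟨pl, List.mem_cons_self, by rw [h2]⟩
              · exact Or.inl h2
            · exact Or.inr ⟨q, List.mem_cons_of_mem _ hq, hqx⟩
        | some e =>
            rw [hg] at h
            rcases ih bn kv h with h1 | ⟨q, hq, hqx⟩
            · exact Or.inl h1
            · exact Or.inr ⟨q, List.mem_cons_of_mem _ hq, hqx⟩

-- entries whose normalized key is empty are invisible to A's fold
lemma pvBNF_dropEmpty (ps : List (String × String)) : ∀ (bn : PySem.Dict String String),
    pvBNF bn (ps.filter (fun q => pvNormKey q.2 ≠ "")) = pvBNF bn ps := by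
  induction ps with
  | nil => intro bn; rfl
  | cons pl rest ih =>
      intro bn
      by_cases hk : pvNormKey pl.2 = ""
      · rw [List.filter_cons_of_neg (by simp [hk])]
        rw [ih]
        simp [pvBNF, hk]
      · rw [List.filter_cons_of_pos (by simp [hk])]
        simp only [pvBNF]
        rw [if_neg hk, if_neg hk]
        cases hg : bn.get? (pvNormKey pl.2) with
        | none => exact ih _
        | some e => exact ih _

lemma pvConf_dropEmpty (ps : List (String × String)) : ∀ (bn : PySem.Dict String String) (x : String),
    pvConf bn (ps.filter (fun q => pvNormKey q.2 ≠ "")) x = pvConf bn ps x := by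
  induction ps with
  | nil => intro bn x; rfl
  | cons pl rest ih =>
      intro bn x
      by_cases hk : pvNormKey pl.2 = ""
      · rw [List.filter_cons_of_neg (by simp [hk])]
        rw [ih]
        simp [pvConf, hk]
      · rw [List.filter_cons_of_pos (by simp [hk])]
        simp only [pvConf]
        rw [if_neg hk, if_neg hk]
        cases hg : bn.get? (pvNormKey pl.2) with
        | none => exact ih _ x
        | some e => rw [ih bn x]

-- PEEL: once a key k is bound in bn, its later occurrences only decide whether k is a duplicate
lemma pvBNF_peel (ps : List (String × String)) : ∀ (bn : PySem.Dict String String)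
    (k pid : String), k ≠ "" → bn.get? k = some pid →
    pvBNF bn ps = pvBNF bn (ps.filter (fun q => pvNormKey q.2 ≠ k)) := by
  induction ps with
  | nil => intro bn k pid hk0 hbn; rfl
  | cons q rest ih =>
      intro bn k pid hk0 hbn
      by_cases hqk : pvNormKey q.2 = k
      · rw [List.filter_cons_of_neg (by simp [hqk])]
        rw [show pvBNF bn (q :: rest) = pvBNF bn rest from by
          rw [pvBNF, if_neg (by rw [hqk]; exact hk0), hqk, hbn]]
        exact ih bn k pid hk0 hbn
      · rw [List.filter_cons_of_pos (by simp [hqk])]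
        by_cases hq0 : pvNormKey q.2 = ""
        · have hstep : ∀ l, pvBNF bn (q :: l) = pvBNF bn l := by
            intro l; rw [pvBNF, if_pos hq0]
          rw [hstep, hstep]
          exact ih bn k pid hk0 hbn
        · cases hg : bn.get? (pvNormKey q.2) with
          | none =>
              have hstep : ∀ l, pvBNF bn (q :: l) = pvBNF (bn.insert (pvNormKey q.2) q.1) l := by
                intro l; rw [pvBNF, if_neg hq0, hg]
              rw [hstep, hstep]
              refine ih _ k pid hk0 ?_
              rw [PySem.Dict.get?_insert_of_ne _ _ (fun h => hqk h.symm)]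
              exact hbn
          | some e =>
              have hstep : ∀ l, pvBNF bn (q :: l) = pvBNF bn l := by
                intro l; rw [pvBNF, if_neg hq0, hg]
              rw [hstep, hstep]
              exact ih bn k pid hk0 hbn

lemma pvConf_peel (ps : List (String × String)) : ∀ (bn : PySem.Dict String String)
    (k pid x : String), k ≠ "" → bn.get? k = some pid →
    (pvConf bn ps x = true ↔
      (x = k ∧ ∃ q ∈ ps, pvNormKey q.2 = k ∧ q.1 ≠ pid) ∨
      pvConf bn (ps.filter (fun q => pvNormKey q.2 ≠ k)) x = true) := by
  induction ps with
  | nil => intro bn k pid x hk0 hbn; simp [pvConf]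
  | cons q rest ih =>
      intro bn k pid x hk0 hbn
      by_cases hqk : pvNormKey q.2 = k
      · rw [List.filter_cons_of_neg (by simp [hqk])]
        rw [show pvConf bn (q :: rest) x = (((pid != q.1) && (x == k)) || pvConf bn rest x) from by
          rw [pvConf, if_neg (by rw [hqk]; exact hk0), hqk, hbn]]
        rw [Bool.or_eq_true, ih bn k pid x hk0 hbn]
        constructor
        · rintro (hq | (⟨hx, w⟩ | hrest))
          · simp only [Bool.and_eq_true, bne_iff_ne, beq_iff_eq] at hq
            exact Or.inl ⟨hq.2, q, List.mem_cons_self, hqk, Ne.symm hq.1⟩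
          · obtain ⟨r, hr, hrk, hrp⟩ := w
            exact Or.inl ⟨hx, r, List.mem_cons_of_mem _ hr, hrk, hrp⟩
          · exact Or.inr hrest
        · rintro (⟨hx, r, hr, hrk, hrp⟩ | hrest)
          · rcases List.mem_cons.mp hr with rfl | hr
            · refine Or.inl ?_
              simp only [Bool.and_eq_true, bne_iff_ne, beq_iff_eq]
              exact ⟨Ne.symm hrp, hx⟩
            · exact Or.inr (Or.inl ⟨hx, r, hr, hrk, hrp⟩)
          · exact Or.inr (Or.inr hrest)
      · rw [List.filter_cons_of_pos (by simp [hqk])]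
        by_cases hq0 : pvNormKey q.2 = ""
        · have hstep : ∀ l, pvConf bn (q :: l) x = pvConf bn l x := by
            intro l; rw [pvConf, if_pos hq0]
          rw [hstep, hstep, ih bn k pid x hk0 hbn]
          constructor
          · rintro (⟨hx, r, hr, hrk, hrp⟩ | h)
            · exact Or.inl ⟨hx, r, List.mem_cons_of_mem _ hr, hrk, hrp⟩
            · exact Or.inr h
          · rintro (⟨hx, r, hr, hrk, hrp⟩ | h)
            · rcases List.mem_cons.mp hr with rfl | hr
              · exact absurd (hq0 ▸ hrk) hk0.symm
              · exact Or.inl ⟨hx, r, hr, hrk, hrp⟩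
            · exact Or.inr h
        · cases hg : bn.get? (pvNormKey q.2) with
          | none =>
              have hstep : ∀ l, pvConf bn (q :: l) x = pvConf (bn.insert (pvNormKey q.2) q.1) l x := by
                intro l; rw [pvConf, if_neg hq0, hg]
              have hbn' : (bn.insert (pvNormKey q.2) q.1).get? k = some pid := by
                rw [PySem.Dict.get?_insert_of_ne _ _ (fun h => hqk h.symm)]
                exact hbn
              rw [hstep, hstep, ih _ k pid x hk0 hbn']
              constructor
              · rintro (⟨hx, r, hr, hrk, hrp⟩ | h)
                · exact Or.inl ⟨hx, r, List.mem_cons_of_mem _ hr, hrk, hrp⟩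
                · exact Or.inr h
              · rintro (⟨hx, r, hr, hrk, hrp⟩ | h)
                · rcases List.mem_cons.mp hr with rfl | hr
                  · exact absurd hrk hqk
                  · exact Or.inl ⟨hx, r, hr, hrk, hrp⟩
                · exact Or.inr h
          | some e =>
              have hstep : ∀ l, pvConf bn (q :: l) x
                  = (((e != q.1) && (x == pvNormKey q.2)) || pvConf bn l x) := by
                intro l; rw [pvConf, if_neg hq0, hg]
              rw [hstep, hstep, Bool.or_eq_true, Bool.or_eq_true, ih bn k pid x hk0 hbn]
              constructor
              · rintro (hB | (⟨hx, r, hr, hrk, hrp⟩ | h))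
                · exact Or.inr (Or.inl hB)
                · exact Or.inl ⟨hx, r, List.mem_cons_of_mem _ hr, hrk, hrp⟩
                · exact Or.inr (Or.inr h)
              · rintro (⟨hx, r, hr, hrk, hrp⟩ | (hB | h))
                · rcases List.mem_cons.mp hr with rfl | hr
                  · exact absurd hrk hqk
                  · exact Or.inr (Or.inl ⟨hx, r, hr, hrk, hrp⟩)
                · exact Or.inl hB
                · exact Or.inr (Or.inr h)

-- PREFIX: a bound key never occurring in ps rides along unchanged in front
lemma pvBNF_prefix (ps : List (String × String)) : ∀ (d : PySem.Dict String String)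
    (k pid : String), (∀ q ∈ ps, pvNormKey q.2 ≠ k) →
    (pvBNF (PySem.Dict.mk ((k, pid) :: d.items)) ps).items = (k, pid) :: (pvBNF d ps).items := by
  induction ps with
  | nil => intro d k pid hall; rfl
  | cons q rest ih =>
      intro d k pid hall
      have hqk : pvNormKey q.2 ≠ k := hall q List.mem_cons_self
      have hall' : ∀ r ∈ rest, pvNormKey r.2 ≠ k := fun r hr => hall r (List.mem_cons_of_mem _ hr)
      have hbig : (PySem.Dict.mk ((k, pid) :: d.items)).get? (pvNormKey q.2) = d.get? (pvNormKey q.2) := by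
        rw [PySem.Dict.get?_mk_cons]
        rw [if_neg (by simp [Ne.symm hqk])]
      by_cases hq0 : pvNormKey q.2 = ""
      · rw [show pvBNF (PySem.Dict.mk ((k, pid) :: d.items)) (q :: rest)
              = pvBNF (PySem.Dict.mk ((k, pid) :: d.items)) rest from by rw [pvBNF, if_pos hq0]]
        rw [show pvBNF d (q :: rest) = pvBNF d rest from by rw [pvBNF, if_pos hq0]]
        exact ih d k pid hall'
      · cases hg : d.get? (pvNormKey q.2) with
        | none =>
            have hc : d.contains (pvNormKey q.2) = false := by
              rw [← PySem.Dict.get?_eq_none_iff_contains]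
              exact hg
            have hbc : (PySem.Dict.mk ((k, pid) :: d.items)).contains (pvNormKey q.2) = false := by
              rw [← PySem.Dict.get?_eq_none_iff_contains]
              rw [hbig]
              exact hg
            have hins : (PySem.Dict.mk ((k, pid) :: d.items)).insert (pvNormKey q.2) q.1
                = PySem.Dict.mk ((k, pid) :: (d.insert (pvNormKey q.2) q.1).items) := by
              apply PySem.Dict.ext
              rw [PySem.Dict.items_insert_of_not_contains _ _ hbc]
              rw [show (PySem.Dict.mk ((k, pid) :: (d.insert (pvNormKey q.2) q.1).items)).items
                    = (k, pid) :: (d.insert (pvNormKey q.2) q.1).items from rfl]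
              rw [PySem.Dict.items_insert_of_not_contains _ _ hc]
              rfl
            rw [show pvBNF (PySem.Dict.mk ((k, pid) :: d.items)) (q :: rest)
                  = pvBNF ((PySem.Dict.mk ((k, pid) :: d.items)).insert (pvNormKey q.2) q.1) rest from by
              rw [pvBNF, if_neg hq0, hbig, hg]]
            rw [show pvBNF d (q :: rest) = pvBNF (d.insert (pvNormKey q.2) q.1) rest from by
              rw [pvBNF, if_neg hq0, hg]]
            rw [hins]
            exact ih _ k pid hall'
        | some e =>
            rw [show pvBNF (PySem.Dict.mk ((k, pid) :: d.items)) (q :: rest)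
                  = pvBNF (PySem.Dict.mk ((k, pid) :: d.items)) rest from by
              rw [pvBNF, if_neg hq0, hbig, hg]]
            rw [show pvBNF d (q :: rest) = pvBNF d rest from by rw [pvBNF, if_neg hq0, hg]]
            exact ih d k pid hall'

lemma pvConf_prefix (ps : List (String × String)) : ∀ (d : PySem.Dict String String)
    (k pid x : String), (∀ q ∈ ps, pvNormKey q.2 ≠ k) →
    pvConf (PySem.Dict.mk ((k, pid) :: d.items)) ps x = pvConf d ps x := by
  induction ps with
  | nil => intro d k pid x hall; rfl
  | cons q rest ih =>
      intro d k pid x hall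
      have hqk : pvNormKey q.2 ≠ k := hall q List.mem_cons_self
      have hall' : ∀ r ∈ rest, pvNormKey r.2 ≠ k := fun r hr => hall r (List.mem_cons_of_mem _ hr)
      have hbig : (PySem.Dict.mk ((k, pid) :: d.items)).get? (pvNormKey q.2) = d.get? (pvNormKey q.2) := by
        rw [PySem.Dict.get?_mk_cons]
        rw [if_neg (by simp [Ne.symm hqk])]
      by_cases hq0 : pvNormKey q.2 = ""
      · rw [show pvConf (PySem.Dict.mk ((k, pid) :: d.items)) (q :: rest) x
              = pvConf (PySem.Dict.mk ((k, pid) :: d.items)) rest x from by rw [pvConf, if_pos hq0]]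
        rw [show pvConf d (q :: rest) x = pvConf d rest x from by rw [pvConf, if_pos hq0]]
        exact ih d k pid x hall'
      · cases hg : d.get? (pvNormKey q.2) with
        | none =>
            have hc : d.contains (pvNormKey q.2) = false := by
              rw [← PySem.Dict.get?_eq_none_iff_contains]
              exact hg
            have hbc : (PySem.Dict.mk ((k, pid) :: d.items)).contains (pvNormKey q.2) = false := by
              rw [← PySem.Dict.get?_eq_none_iff_contains]
              rw [hbig]
              exact hg
            have hins : (PySem.Dict.mk ((k, pid) :: d.items)).insert (pvNormKey q.2) q.1
                = PySem.Dict.mk ((k, pid) :: (d.insert (pvNormKey q.2) q.1).items) := by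
              apply PySem.Dict.ext
              rw [PySem.Dict.items_insert_of_not_contains _ _ hbc]
              rw [show (PySem.Dict.mk ((k, pid) :: (d.insert (pvNormKey q.2) q.1).items)).items
                    = (k, pid) :: (d.insert (pvNormKey q.2) q.1).items from rfl]
              rw [PySem.Dict.items_insert_of_not_contains _ _ hc]
              rfl
            rw [show pvConf (PySem.Dict.mk ((k, pid) :: d.items)) (q :: rest) x
                  = pvConf ((PySem.Dict.mk ((k, pid) :: d.items)).insert (pvNormKey q.2) q.1) rest x from by
              rw [pvConf, if_neg hq0, hbig, hg]]
            rw [show pvConf d (q :: rest) x = pvConf (d.insert (pvNormKey q.2) q.1) rest x from by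
              rw [pvConf, if_neg hq0, hg]]
            rw [hins]
            exact ih _ k pid x hall'
        | some e =>
            rw [show pvConf (PySem.Dict.mk ((k, pid) :: d.items)) (q :: rest) x
                  = (((e != q.1) && (x == pvNormKey q.2)) || pvConf (PySem.Dict.mk ((k, pid) :: d.items)) rest x) from by
              rw [pvConf, if_neg hq0, hbig, hg]]
            rw [show pvConf d (q :: rest) x = (((e != q.1) && (x == pvNormKey q.2)) || pvConf d rest x) from by
              rw [pvConf, if_neg hq0, hg]]
            rw [ih d k pid x hall']

-- pvGo over keys fresh for out appends to out
lemma pvGo_append (n : Nat) : ∀ (pairs : List (String × String)), pairs.length ≤ n →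
    ∀ (out : PySem.Dict String String), (∀ p ∈ pairs, out.contains p.2 = false) →
    (pvGo pairs out).items = out.items ++ (pvGo pairs PySem.Dict.empty).items := by
  induction n with
  | zero =>
      intro pairs hlen out hfresh
      rw [List.length_eq_zero_iff.mp (Nat.le_zero.mp hlen)]
      simp [pvGo, PySem.Dict.empty]
  | succ n ihn =>
      intro pairs hlen out hfresh
      match pairs with
      | [] => simp [pvGo, PySem.Dict.empty]
      | (pid, key) :: rest =>
          have hlen' : (rest.filter (fun p => p.2 ≠ key)).length ≤ n := by
            have := List.length_filter_le (fun p => decide (p.2 ≠ key)) rest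
            simp only [List.length_cons] at hlen
            omega
          have hfr : ∀ p ∈ rest.filter (fun p => p.2 ≠ key), p.2 ≠ key :=
            fun p hp => by simpa using (List.of_mem_filter hp)
          by_cases hC : key ≠ "" ∧ ∀ p ∈ rest, p.2 = key → p.1 = pid
          · rw [pvGo, if_pos hC, pvGo, if_pos hC]
            have hkey : out.contains key = false := hfresh _ List.mem_cons_self
            have h1 : (pvGo (rest.filter (fun p => p.2 ≠ key)) (out.insert key pid)).items
                = (out.insert key pid).items ++ (pvGo (rest.filter (fun p => p.2 ≠ key)) PySem.Dict.empty).items := by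
              refine ihn _ hlen' _ ?_
              intro p hp
              rw [PySem.Dict.contains_insert]
              have h2 : (p.2 == key) = false := by simpa using hfr p hp
              rw [h2]
              simp only [Bool.false_or]
              exact hfresh p (List.mem_cons_of_mem _ (List.mem_of_mem_filter hp))
            have h3 : (pvGo (rest.filter (fun p => p.2 ≠ key)) (PySem.Dict.empty.insert key pid)).items
                = (PySem.Dict.empty.insert key pid).items ++ (pvGo (rest.filter (fun p => p.2 ≠ key)) PySem.Dict.empty).items := by
              refine ihn _ hlen' _ ?_
              intro p hp
              rw [PySem.Dict.contains_insert]
              have h2 : (p.2 == key) = false := by simpa using hfr p hp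
              rw [h2]
              simp
            rw [h1, h3]
            rw [PySem.Dict.items_insert_of_not_contains _ _ hkey]
            rw [show (PySem.Dict.empty.insert key pid : PySem.Dict String String).items = [(key, pid)] from rfl]
            simp
          · rw [pvGo, if_neg hC, pvGo, if_neg hC]
            have h1 := ihn _ hlen' out (fun p hp => hfresh p (List.mem_cons_of_mem _ (List.mem_of_mem_filter hp)))
            rw [h1]

-- MAIN: A's surviving by_name entries are exactly B's worklist output
lemma pvMain (n : Nat) : ∀ (ps : List (String × String)), ps.length ≤ n →
    (pvBNF PySem.Dict.empty ps).items.filter (fun kv => !pvConf PySem.Dict.empty ps kv.1) =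
      (pvGo (ps.map (fun pl => (pl.1, pvNormKey pl.2))) PySem.Dict.empty).items := by
  induction n with
  | zero =>
      intro ps hlen
      rw [List.length_eq_zero_iff.mp (Nat.le_zero.mp hlen)]
      simp [pvBNF, pvGo, PySem.Dict.empty]
  | succ n ihn =>
      intro ps hlen
      match ps with
      | [] => simp [pvBNF, pvGo, PySem.Dict.empty]
      | pl :: rest =>
          have hlenr : rest.length ≤ n := by
            simp only [List.length_cons] at hlen
            omega
          have hfm : ∀ (c : String),
              ((rest.map (fun pl => (pl.1, pvNormKey pl.2))).filter (fun p => p.2 ≠ c))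
                = (rest.filter (fun q => pvNormKey q.2 ≠ c)).map (fun pl => (pl.1, pvNormKey pl.2)) := by
            intro c
            rw [List.filter_map]
            apply congrArg
            apply List.filter_congr
            intro q hq
            simp [Function.comp]
          by_cases hk : pvNormKey pl.2 = ""
          · -- an empty normalized key is skipped by A and discarded wholesale by B
            have hB : pvBNF PySem.Dict.empty (pl :: rest) = pvBNF PySem.Dict.empty rest := by
              rw [pvBNF, if_pos hk]
            have hCf : ∀ x, pvConf PySem.Dict.empty (pl :: rest) x = pvConf PySem.Dict.empty rest x := by
              intro x; rw [pvConf, if_pos hk]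
            have hlenf : (rest.filter (fun q => pvNormKey q.2 ≠ "")).length ≤ n :=
              le_trans (List.length_filter_le _ _) hlenr
            rw [hB, List.filter_congr (fun kv _ => by rw [hCf kv.1])]
            rw [← pvBNF_dropEmpty rest PySem.Dict.empty]
            rw [List.filter_congr (fun kv _ => by rw [← pvConf_dropEmpty rest PySem.Dict.empty kv.1])]
            rw [ihn _ hlenf]
            rw [List.map_cons, pvGo, if_neg (by simp [hk]), hk, hfm ""]
          · have hbn1 : (PySem.Dict.empty.insert (pvNormKey pl.2) pl.1).get? (pvNormKey pl.2)
                = some pl.1 := PySem.Dict.get?_insert_self _ _ _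
            have hB : pvBNF PySem.Dict.empty (pl :: rest)
                = pvBNF (PySem.Dict.empty.insert (pvNormKey pl.2) pl.1) rest := by
              rw [pvBNF, if_neg hk, PySem.Dict.get?_empty]
            have hCf : ∀ x, pvConf PySem.Dict.empty (pl :: rest) x
                = pvConf (PySem.Dict.empty.insert (pvNormKey pl.2) pl.1) rest x := by
              intro x; rw [pvConf, if_neg hk, PySem.Dict.get?_empty]
            have hall' : ∀ q ∈ rest.filter (fun q => pvNormKey q.2 ≠ pvNormKey pl.2),
                pvNormKey q.2 ≠ pvNormKey pl.2 := fun q hq => by simpa using List.of_mem_filter hq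
            have hpeelB := pvBNF_peel rest (PySem.Dict.empty.insert (pvNormKey pl.2) pl.1)
              (pvNormKey pl.2) pl.1 hk hbn1
            have hpeelC := fun x => pvConf_peel rest (PySem.Dict.empty.insert (pvNormKey pl.2) pl.1)
              (pvNormKey pl.2) pl.1 x hk hbn1
            have hpre := pvBNF_prefix (rest.filter (fun q => pvNormKey q.2 ≠ pvNormKey pl.2))
              PySem.Dict.empty (pvNormKey pl.2) pl.1 hall'
            have hpreC := fun x => pvConf_prefix (rest.filter (fun q => pvNormKey q.2 ≠ pvNormKey pl.2))
              PySem.Dict.empty (pvNormKey pl.2) pl.1 x hall'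
            have hmk : (PySem.Dict.mk ((pvNormKey pl.2, pl.1)
                  :: (PySem.Dict.empty : PySem.Dict String String).items) : PySem.Dict String String)
                = PySem.Dict.empty.insert (pvNormKey pl.2) pl.1 := rfl
            rw [hmk] at hpre
            simp only [hmk] at hpreC
            have hconfk : pvConf PySem.Dict.empty (rest.filter (fun q => pvNormKey q.2 ≠ pvNormKey pl.2))
                (pvNormKey pl.2) = false := by
              cases hcc : pvConf PySem.Dict.empty (rest.filter (fun q => pvNormKey q.2 ≠ pvNormKey pl.2))
                (pvNormKey pl.2) with
              | false => rfl
              | true =>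
                  obtain ⟨q, hq, hqk⟩ := pvConfKeys _ _ _ hcc
                  exact absurd hqk (hall' q hq)
            have htail : ∀ kv ∈ (pvBNF PySem.Dict.empty
                (rest.filter (fun q => pvNormKey q.2 ≠ pvNormKey pl.2))).items,
                kv.1 ≠ pvNormKey pl.2 := by
              intro kv hm
              rcases pvBNFKeys _ _ kv hm with h | ⟨q, hq, hqx⟩
              · exact absurd h (by simp [PySem.Dict.empty])
              · rw [← hqx]; exact hall' q hq
            have hlenf : (rest.filter (fun q => pvNormKey q.2 ≠ pvNormKey pl.2)).length ≤ n :=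
              le_trans (List.length_filter_le _ _) hlenr
            have hheadiff : pvConf (PySem.Dict.empty.insert (pvNormKey pl.2) pl.1) rest
                (pvNormKey pl.2) = true ↔
                ∃ q ∈ rest, pvNormKey q.2 = pvNormKey pl.2 ∧ q.1 ≠ pl.1 := by
              rw [hpeelC (pvNormKey pl.2)]
              constructor
              · rintro (⟨_, hE⟩ | h)
                · exact hE
                · rw [hpreC (pvNormKey pl.2), hconfk] at h
                  cases h
              · intro hE
                exact Or.inl ⟨rfl, hE⟩
            have hcg : ∀ kv ∈ (pvBNF PySem.Dict.empty
                (rest.filter (fun q => pvNormKey q.2 ≠ pvNormKey pl.2))).items,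
                (!pvConf (PySem.Dict.empty.insert (pvNormKey pl.2) pl.1) rest kv.1)
                  = (!pvConf PySem.Dict.empty
                      (rest.filter (fun q => pvNormKey q.2 ≠ pvNormKey pl.2)) kv.1) := by
              intro kv hm
              have h1 := hpeelC kv.1
              rw [hpreC kv.1] at h1
              have hne := htail kv hm
              cases h2 : pvConf PySem.Dict.empty
                  (rest.filter (fun q => pvNormKey q.2 ≠ pvNormKey pl.2)) kv.1 with
              | true => rw [h1.mpr (Or.inr h2)]
              | false =>
                  cases h3 : pvConf (PySem.Dict.empty.insert (pvNormKey pl.2) pl.1) rest kv.1 with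
                  | false => rfl
                  | true =>
                      rcases h1.mp h3 with ⟨hxk, _⟩ | h4
                      · exact absurd hxk hne
                      · rw [h2] at h4; cases h4
            rw [hB, List.filter_congr (fun kv _ => by rw [hCf kv.1]), hpeelB]
            rw [hpre]
            rw [List.map_cons]
            by_cases hE : ∃ q ∈ rest, pvNormKey q.2 = pvNormKey pl.2 ∧ q.1 ≠ pl.1
            · -- ambiguous key: A pops it, B never emits it
              have hhead : pvConf (PySem.Dict.empty.insert (pvNormKey pl.2) pl.1) rest
                  (pvNormKey pl.2) = true := hheadiff.mpr hE
              rw [List.filter_cons_of_neg (by simp [hhead])]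
              rw [List.filter_congr hcg, ihn _ hlenf]
              have hCfalse : ¬ (pvNormKey pl.2 ≠ "" ∧
                  ∀ p ∈ rest.map (fun pl => (pl.1, pvNormKey pl.2)),
                    p.2 = pvNormKey pl.2 → p.1 = pl.1) := by
                rintro ⟨-, hforall⟩
                obtain ⟨q, hq, hqk, hqp⟩ := hE
                exact hqp (hforall (q.1, pvNormKey q.2) (List.mem_map.mpr ⟨q, hq, rfl⟩) hqk)
              rw [pvGo, if_neg hCfalse, hfm (pvNormKey pl.2)]
            · have hhead : pvConf (PySem.Dict.empty.insert (pvNormKey pl.2) pl.1) rest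
                  (pvNormKey pl.2) = false := by
                cases h3 : pvConf (PySem.Dict.empty.insert (pvNormKey pl.2) pl.1) rest
                    (pvNormKey pl.2) with
                | false => rfl
                | true => exact absurd (hheadiff.mp h3) hE
              rw [List.filter_cons_of_pos (by simp [hhead])]
              rw [List.filter_congr hcg, ihn _ hlenf]
              have hCtrue : pvNormKey pl.2 ≠ "" ∧
                  ∀ p ∈ rest.map (fun pl => (pl.1, pvNormKey pl.2)),
                    p.2 = pvNormKey pl.2 → p.1 = pl.1 := by
                refine ⟨hk, ?_⟩
                intro p hp hpk
                obtain ⟨q, hq, rfl⟩ := List.mem_map.mp hp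
                by_contra hne
                exact hE ⟨q, hq, hpk, hne⟩
              rw [pvGo, if_pos hCtrue, hfm (pvNormKey pl.2)]
              have hfresh2 : ∀ p ∈ (rest.filter (fun q => pvNormKey q.2 ≠ pvNormKey pl.2)).map
                  (fun pl => (pl.1, pvNormKey pl.2)),
                  (PySem.Dict.empty.insert (pvNormKey pl.2) pl.1).contains p.2 = false := by
                intro p hp
                obtain ⟨q, hq, rfl⟩ := List.mem_map.mp hp
                rw [PySem.Dict.contains_insert]
                have h2 : (pvNormKey q.2 == pvNormKey pl.2) = false := by
                  simpa using hall' q hq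
                rw [h2]
                simp [PySem.Dict.empty, PySem.Dict.contains]
              have happ := pvGo_append ((rest.filter (fun q => pvNormKey q.2 ≠ pvNormKey pl.2)).map
                  (fun pl => (pl.1, pvNormKey pl.2))).length _ le_rfl
                  (PySem.Dict.empty.insert (pvNormKey pl.2) pl.1) hfresh2
              rw [happ]
              rfl

-- ===== VERDICT (by name: the statement is the Claim_ definition above) =====
theorem build_player_name_index_py_spec : Claim_equal_build_player_name_index_py := by
  intro players _
  show _ = _
  unfold build_player_name_index_py build_player_name_index_py_alt
  rw [pvEraseFold, pvL1]
  rw [List.filter_congr (fun kv _ => ?_), pvMain players.length players le_rfl]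
  have h := pvL2 players PySem.Dict.empty PySem.Set.empty kv.1
  simp only [PySem.Set.empty, List.not_mem_nil, false_or] at h
  rw [Bool.eq_iff_iff]
  simp [h]
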